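-- pv_equiv track=rewrite | github.com/mar477/ORIE5270 | HW3/p3.py | maxNumberOfWords
-- ===== SOURCE A (Python) =====
-- from collections import Counter #Import Counter from collections
--
-- def maxNumberOfWords(text,word):
--
--     # Produces a dictionary with each alphabet and their count in word
--     word_counter = Counter(word.lower())
--     # Produces a dictionary with each alphabet and their count in text
--     text_counter = Counter(text.lower())
--
--     # Start of count
--     i = 0
--     # Subtracts the counts of text from the word each time until it becomes negative
--     # This means that "text' has run out of alphabets to choose from
--     while (text_counter[min(text_counter,key=text_counter.get)]) > 0 :
--         # Removing word from the text
--         text_counter.subtract(word_counter)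
--         # If the removal was possible, append i (counter)
--         if (text_counter[min(text_counter,key=text_counter.get)]) >= 0:
--             i += 1 #Counter not negative so added
--     return i
-- ===== SOURCE B (Python) =====
-- from collections import Counter
--
-- def maxNumberOfWords(text, word):
--     text_counter = Counter(text.lower())
--     word_counter = Counter(word.lower())
--     return min(text_counter[c] // n for c, n in word_counter.items())
-- ===== Notes on version B (the rewrite author's own statement) =====
-- stated objective: simpler
-- what changed: Replaces the repeated Counter.subtract rounds (each re-scanning the whole counter for its minimum, one round per word formed) by a single closed-form min over the word's letters of text_count[c] // word_count[c].
import Mathlib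
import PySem

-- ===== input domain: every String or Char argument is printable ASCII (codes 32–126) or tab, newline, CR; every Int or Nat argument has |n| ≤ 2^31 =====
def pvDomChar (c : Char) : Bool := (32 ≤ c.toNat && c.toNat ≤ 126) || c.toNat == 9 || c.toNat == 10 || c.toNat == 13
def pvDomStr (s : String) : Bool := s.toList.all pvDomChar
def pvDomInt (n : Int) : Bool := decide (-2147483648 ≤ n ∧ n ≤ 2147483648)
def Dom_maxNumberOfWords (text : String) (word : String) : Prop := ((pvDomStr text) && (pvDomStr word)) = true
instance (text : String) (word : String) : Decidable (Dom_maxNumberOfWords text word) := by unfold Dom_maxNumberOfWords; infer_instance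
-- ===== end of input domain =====

-- B replaces A's repeated Counter-subtract rounds (each re-scanning the whole counter for its
-- minimum) by a single closed-form min of text_count[c] // word_count[c]; objective: simpler.

-- ===== PORT A =====
-- text_counter[min(text_counter, key=text_counter.get)]
def pyCounterMinVal (d : PySem.Dict Char Int) : Int :=
  match PySem.List.min? d.keys (fun k => d.getD k 0) with
  | some k => d.getD k 0
  | none => 0  -- unreachable inside Pre_: Python's min raises ValueError on an empty counter

-- text_counter.subtract(word_counter): in place, key order of word_counter, new keys appended
def pySubtract (d w : PySem.Dict Char Int) : PySem.Dict Char Int :=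
  w.items.foldl (fun acc kv => acc.insert kv.1 (acc.getD kv.1 0 - kv.2)) d

-- the while loop; fuel is a totality guard only (inside Pre_ the loop runs at most |text|+2 rounds)
def loopA (wc : PySem.Dict Char Int) : Nat → PySem.Dict Char Int → Int → Int
  | 0, _, i => i
  | fuel + 1, d, i =>
    if pyCounterMinVal d > 0 then
      let d' := pySubtract d wc
      loopA wc fuel d' (if pyCounterMinVal d' ≥ 0 then i + 1 else i)
    else i

def maxNumberOfWords (text : String) (word : String) : Int :=
  let word_counter := PySem.Dict.counter (PySem.Str.lower word).toList
  let text_counter := PySem.Dict.counter (PySem.Str.lower text).toList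
  loopA word_counter ((PySem.Str.lower text).toList.length + 2) text_counter 0

-- ===== PORT B =====
def maxNumberOfWords_alt (text : String) (word : String) : Int :=
  let t := PySem.Dict.counter (PySem.Str.lower text).toList
  let w := PySem.Dict.counter (PySem.Str.lower word).toList
  match PySem.List.min? (w.items.map (fun p => PySem.Int.floordiv (t.getD p.1 0) p.2)) (fun x => x) with
  | some m => m
  | none => 0  -- unreachable inside Pre_: Python's min raises ValueError on an empty word

-- ===== PRECONDITION & SPEC =====
-- Pre_ excludes text = "" (A's min over an empty Counter raises ValueError) and word = ""
-- (A's while loop never terminates there); both are outside A's normal returns.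
def Pre_maxNumberOfWords (text : String) (word : String) : Prop := text ≠ "" ∧ word ≠ ""
instance (text : String) (word : String) : Decidable (Pre_maxNumberOfWords text word) := by unfold Pre_maxNumberOfWords; infer_instance
def pvWitness_maxNumberOfWords : String × String := ("ab", "b")

def Spec_maxNumberOfWords (text : String) (word : String) (out : Int) : Prop := out = maxNumberOfWords_alt text word
instance (text : String) (word : String) (out : Int) : Decidable (Spec_maxNumberOfWords text word out) := by unfold Spec_maxNumberOfWords; infer_instance

-- ===== CLAIM (what is proved, stated in full; the proofs are below) =====
def Claim_equal_maxNumberOfWords : Prop := ∀ (text : String) (word : String), Dom_maxNumberOfWords text word → Pre_maxNumberOfWords text word → Spec_maxNumberOfWords text word (maxNumberOfWords text word)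

-- ===== LEMMAS AND PROOFS =====

theorem loopA_succ (wc : PySem.Dict Char Int) (fuel : Nat) (d : PySem.Dict Char Int) (i : Int) :
    loopA wc (fuel + 1) d i =
      if pyCounterMinVal d > 0 then
        loopA wc fuel (pySubtract d wc) (if pyCounterMinVal (pySubtract d wc) ≥ 0 then i + 1 else i)
      else i := rfl

theorem le_floordiv_iff (a b k : Int) (hb : 0 < b) :
    k ≤ PySem.Int.floordiv a b ↔ k * b ≤ a := by
  unfold PySem.Int.floordiv
  rw [Int.fdiv_eq_ediv, if_pos (Or.inl hb.le), sub_zero]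
  exact Int.le_ediv_iff_mul_le hb

theorem floordiv_le_self (a b : Int) (ha : 0 ≤ a) (hb : 0 ≤ b) :
    PySem.Int.floordiv a b ≤ a := by
  unfold PySem.Int.floordiv
  rw [Int.fdiv_eq_ediv, if_pos (Or.inl hb), sub_zero]
  exact Int.ediv_le_self _ ha

theorem minVal_pos_iff (d : PySem.Dict Char Int) (h : d.keys ≠ []) :
    (pyCounterMinVal d > 0) ↔ ∀ c ∈ d.keys, 0 < d.getD c 0 := by
  unfold pyCounterMinVal
  cases hm : PySem.List.min? d.keys (fun k => d.getD k 0) with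
  | none => exact absurd ((PySem.List.min?_eq_none_iff _ _).mp hm) h
  | some k0 =>
    constructor
    · intro hp c hc
      exact lt_of_lt_of_le hp (PySem.List.min?_isMin hm c hc)
    · intro hall
      exact hall k0 (PySem.List.min?_mem hm)

theorem minVal_nonneg_iff (d : PySem.Dict Char Int) (h : d.keys ≠ []) :
    (pyCounterMinVal d ≥ 0) ↔ ∀ c ∈ d.keys, 0 ≤ d.getD c 0 := by
  unfold pyCounterMinVal
  cases hm : PySem.List.min? d.keys (fun k => d.getD k 0) with
  | none => exact absurd ((PySem.List.min?_eq_none_iff _ _).mp hm) h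
  | some k0 =>
    constructor
    · intro hp c hc
      exact le_trans hp (PySem.List.min?_isMin hm c hc)
    · intro hall
      exact hall k0 (PySem.List.min?_mem hm)

theorem fold_sub_getD (ps : List (Char × Int)) (d : PySem.Dict Char Int) (c : Char) :
    (ps.foldl (fun acc kv => acc.insert kv.1 (acc.getD kv.1 0 - kv.2)) d).getD c 0
      = d.getD c 0 - ((ps.filter (fun kv => kv.1 == c)).map Prod.snd).sum := by
  induction ps generalizing d with
  | nil => simp
  | cons kv ps ih =>
    simp only [List.foldl_cons, ih, List.filter_cons]
    by_cases h : kv.1 = c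
    · simp only [h, beq_self_eq_true, if_pos, List.map_cons, List.sum_cons,
        PySem.Dict.getD_insert]
      ring
    · have hne : (kv.1 == c) = false := beq_eq_false_iff_ne.mpr h
      have hcn : c ≠ kv.1 := fun hh => h hh.symm
      simp [hne, PySem.Dict.getD_insert, hcn]

theorem map_filter_sum (S : List Char) (f : Char → Int) (c : Char) (h : S.Nodup) :
    (((S.map (fun k => (k, f k))).filter (fun kv => kv.1 == c)).map Prod.snd).sum
      = if c ∈ S then f c else 0 := by
  induction S with
  | nil => simp
  | cons a S ih =>
    have hna : a ∉ S := (List.nodup_cons.mp h).1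
    have hS : S.Nodup := (List.nodup_cons.mp h).2
    by_cases hac : a = c
    · have hcS : c ∉ S := hac ▸ hna
      simp [hac, ih hS, hcS]
    · have hne : (a == c) = false := beq_eq_false_iff_ne.mpr hac
      have : (c ∈ a :: S) ↔ c ∈ S := by simp [Ne.symm hac]
      simp [hne, ih hS, this]

theorem subtract_getD (W : List Char) (d : PySem.Dict Char Int) (c : Char) :
    (pySubtract d (PySem.Dict.counter W)).getD c 0 = d.getD c 0 - (W.count c : Int) := by
  unfold pySubtract
  rw [PySem.Dict.items_counter, fold_sub_getD,
    map_filter_sum (PySem.Set.ofList W) (fun k => ((W.count k : Int))) c (PySem.Set.nodup_ofList W)]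
  by_cases hc : c ∈ W
  · simp [(PySem.Set.mem_ofList W c).mpr hc]
  · have h0 : W.count c = 0 := List.count_eq_zero.mpr hc
    have : c ∉ PySem.Set.ofList W := fun hh => hc ((PySem.Set.mem_ofList W c).mp hh)
    simp [this, h0]

theorem subtract_mem_keys (W : List Char) (d : PySem.Dict Char Int) (c : Char) :
    c ∈ (pySubtract d (PySem.Dict.counter W)).keys ↔ c ∈ d.keys ∨ c ∈ W := by
  unfold pySubtract
  rw [PySem.Dict.keys_foldl_insert_key ((PySem.Dict.counter W).items) Prod.fst
      (fun acc kv => acc.getD kv.1 0 - kv.2) d]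
  rw [PySem.Set.mem_update]
  constructor
  · rintro (h | h)
    · exact Or.inl h
    · right
      rw [PySem.Dict.items_counter] at h
      simp only [List.map_map, List.mem_map] at h
      obtain ⟨k, hk, hkc⟩ := h
      simp only [Function.comp] at hkc
      rw [← hkc]
      exact (PySem.Set.mem_ofList W k).mp hk
  · rintro (h | h)
    · exact Or.inl h
    · right
      rw [PySem.Dict.items_counter]
      simp only [List.map_map, List.mem_map]
      exact ⟨c, (PySem.Set.mem_ofList W c).mpr h, rfl⟩

-- A stops and returns i as soon as the round counter k exceeds r (the min of the quotients)
theorem loop_stop (L W : List Char) (r : Int)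
    (hmem : ∃ c ∈ W, r = PySem.Int.floordiv (L.count c : Int) (W.count c : Int)) :
    ∀ (fuel : Nat) (d : PySem.Dict Char Int) (i k : Int),
      (∀ c, d.getD c 0 = (L.count c : Int) - k * (W.count c : Int)) →
      (∀ c, c ∈ d.keys ↔ c ∈ L ∨ c ∈ W) →
      r < k → loopA (PySem.Dict.counter W) fuel d i = i := by
  intro fuel d i k hval hkeys hrk
  obtain ⟨c0, hc0W, hc0r⟩ := hmem
  have hw0 : (0 : Int) < (W.count c0 : Int) := by
    exact_mod_cast List.count_pos_iff.mpr hc0W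
  have hkne : d.keys ≠ [] := List.ne_nil_of_mem ((hkeys c0).mpr (Or.inr hc0W))
  cases fuel with
  | zero => rfl
  | succ fuel =>
    rw [loopA_succ, if_neg]
    intro hpos
    have hall := (minVal_pos_iff d hkne).mp hpos
    have h1 := hall c0 ((hkeys c0).mpr (Or.inr hc0W))
    rw [hval c0] at h1
    -- t c0 > k * w c0 ≥ (r+1) * w c0, so r + 1 ≤ floordiv t w = r
    have h2 : (r + 1) * (W.count c0 : Int) ≤ k * (W.count c0 : Int) :=
      mul_le_mul_of_nonneg_right (by omega) hw0.le
    have h3 : (r + 1) * (W.count c0 : Int) ≤ (L.count c0 : Int) := by omega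
    have h4 : r + 1 ≤ PySem.Int.floordiv (L.count c0 : Int) (W.count c0 : Int) :=
      (le_floordiv_iff _ _ _ hw0).mpr h3
    omega

-- while k ≤ r the loop keeps running and adds one per round
theorem loop_run (L W : List Char) (r : Int)
    (hmem : ∃ c ∈ W, r = PySem.Int.floordiv (L.count c : Int) (W.count c : Int))
    (hmin : ∀ c ∈ W, r ≤ PySem.Int.floordiv (L.count c : Int) (W.count c : Int)) :
    ∀ (fuel : Nat) (d : PySem.Dict Char Int) (i k : Int),
      1 ≤ k → k ≤ r →
      (∀ c, d.getD c 0 = (L.count c : Int) - k * (W.count c : Int)) →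
      (∀ c, c ∈ d.keys ↔ c ∈ L ∨ c ∈ W) →
      (r.toNat + 1 - k.toNat ≤ fuel) →
      loopA (PySem.Dict.counter W) fuel d i = i + (r - k) := by
  intro fuel
  induction fuel with
  | zero =>
    intro d i k hk1 hkr hval hkeys hfuel
    omega
  | succ fuel ih =>
    intro d i k hk1 hkr hval hkeys hfuel
    obtain ⟨c0, hc0W, hc0r⟩ := hmem
    have hkne : d.keys ≠ [] := List.ne_nil_of_mem ((hkeys c0).mpr (Or.inr hc0W))
    rw [loopA_succ]
    by_cases hguard : pyCounterMinVal d > 0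
    · rw [if_pos hguard]
      -- invariant for the subtracted dict
      have hval' : ∀ c, (pySubtract d (PySem.Dict.counter W)).getD c 0
          = (L.count c : Int) - (k + 1) * (W.count c : Int) := by
        intro c
        rw [subtract_getD, hval c]
        ring
      have hkeys' : ∀ c, c ∈ (pySubtract d (PySem.Dict.counter W)).keys ↔ c ∈ L ∨ c ∈ W := by
        intro c
        rw [subtract_mem_keys]
        constructor
        · rintro (h | h)
          · exact (hkeys c).mp h
          · exact Or.inr h
        · intro h
          exact Or.inl ((hkeys c).mpr h)
      have hkne' : (pySubtract d (PySem.Dict.counter W)).keys ≠ [] :=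
        List.ne_nil_of_mem ((hkeys' c0).mpr (Or.inr hc0W))
      by_cases hlast : k = r
      · -- last successful round: subtract makes some count negative, no increment, then stop
        have hneg : ¬ (pyCounterMinVal (pySubtract d (PySem.Dict.counter W)) ≥ 0) := by
          intro hge
          have hall := (minVal_nonneg_iff _ hkne').mp hge
          have h1 := hall c0 ((hkeys' c0).mpr (Or.inr hc0W))
          rw [hval' c0] at h1
          have hw0 : (0 : Int) < (W.count c0 : Int) := by
            exact_mod_cast List.count_pos_iff.mpr hc0W
          have h4 : r + 1 ≤ PySem.Int.floordiv (L.count c0 : Int) (W.count c0 : Int) :=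
            (le_floordiv_iff _ _ _ hw0).mpr (by
              have : (r + 1) * (W.count c0 : Int) = (k + 1) * (W.count c0 : Int) := by rw [hlast]
              omega)
          omega
        rw [if_neg hneg]
        rw [loop_stop L W r ⟨c0, hc0W, hc0r⟩ fuel _ i (k + 1) hval' hkeys' (by omega)]
        omega
      · -- k < r: the subtraction stays nonnegative, increment, recurse
        have hklt : k + 1 ≤ r := by omega
        have hpos' : pyCounterMinVal (pySubtract d (PySem.Dict.counter W)) ≥ 0 := by
          rw [minVal_nonneg_iff _ hkne']
          intro c hc
          rw [hval' c]
          rcases (hkeys' c).mp hc with hcL | hcW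
          · by_cases hcW2 : c ∈ W
            · have hw0 : (0 : Int) < (W.count c : Int) := by
                exact_mod_cast List.count_pos_iff.mpr hcW2
              have h4 := (le_floordiv_iff (L.count c : Int) (W.count c : Int) (k + 1) hw0).mp
                (le_trans hklt (hmin c hcW2))
              omega
            · have h0 : ((W.count c : Int)) = 0 := by
                exact_mod_cast List.count_eq_zero.mpr hcW2
              rw [h0]
              simp
          · have hw0 : (0 : Int) < (W.count c : Int) := by
              exact_mod_cast List.count_pos_iff.mpr hcW
            have h4 := (le_floordiv_iff (L.count c : Int) (W.count c : Int) (k + 1) hw0).mp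
              (le_trans hklt (hmin c hcW))
            omega
        rw [if_pos hpos']
        rw [ih _ (i + 1) (k + 1) (by omega) hklt hval' hkeys' (by omega)]
        omega
    · -- the guard can only fail here if k = r (some count hit exactly zero)
      rw [if_neg hguard]
      have : k = r := by
        by_contra hne
        apply hguard
        rw [minVal_pos_iff d hkne]
        intro c hc
        rw [hval c]
        rcases (hkeys c).mp hc with hcL | hcW
        · by_cases hcW2 : c ∈ W
          · have hw0 : (0 : Int) < (W.count c : Int) := by
              exact_mod_cast List.count_pos_iff.mpr hcW2
            have h4 := (le_floordiv_iff (L.count c : Int) (W.count c : Int) (k + 1) hw0).mp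
              (le_trans (by omega) (hmin c hcW2))
            have he : (k + 1) * (W.count c : Int) = k * (W.count c : Int) + (W.count c : Int) := by ring
            omega
          · have h0 : ((W.count c : Int)) = 0 := by
              exact_mod_cast List.count_eq_zero.mpr hcW2
            have h1 : 0 < L.count c := List.count_pos_iff.mpr hcL
            rw [h0]
            simpa using hcL
        · have hw0 : (0 : Int) < (W.count c : Int) := by
            exact_mod_cast List.count_pos_iff.mpr hcW
          have h4 := (le_floordiv_iff (L.count c : Int) (W.count c : Int) (k + 1) hw0).mp
            (le_trans (by omega) (hmin c hcW))
          have he : (k + 1) * (W.count c : Int) = k * (W.count c : Int) + (W.count c : Int) := by ring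
          omega
      omega

-- the abstract equality, over the lowered character lists
theorem core_eq (L W : List Char) (hL : L ≠ []) (hW : W ≠ []) :
    loopA (PySem.Dict.counter W) (L.length + 2) (PySem.Dict.counter L) 0
      = (match PySem.List.min?
            (((PySem.Dict.counter W).items).map
              (fun p => PySem.Int.floordiv ((PySem.Dict.counter L).getD p.1 0) p.2))
            (fun x => x) with
          | some m => m
          | none => 0) := by
  -- normalise the list B takes the min over
  have hvs : ((PySem.Dict.counter W).items).map
      (fun p => PySem.Int.floordiv ((PySem.Dict.counter L).getD p.1 0) p.2)
      = (PySem.Set.ofList W).map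
          (fun c => PySem.Int.floordiv (L.count c : Int) (W.count c : Int)) := by
    rw [PySem.Dict.items_counter, List.map_map]
    refine List.map_congr_left ?_
    intro c _
    simp [PySem.Dict.getD_counter]
  rw [hvs]
  -- the min exists
  have hWS : PySem.Set.ofList W ≠ [] := by
    obtain ⟨c, hc⟩ := List.exists_mem_of_ne_nil W hW
    exact List.ne_nil_of_mem ((PySem.Set.mem_ofList W c).mpr hc)
  have hvne : (PySem.Set.ofList W).map
      (fun c => PySem.Int.floordiv (L.count c : Int) (W.count c : Int)) ≠ [] := by
    simpa using hWS
  cases hm : PySem.List.min?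
      ((PySem.Set.ofList W).map
        (fun c => PySem.Int.floordiv (L.count c : Int) (W.count c : Int))) (fun x => x) with
  | none => exact absurd ((PySem.List.min?_eq_none_iff _ _).mp hm) hvne
  | some r =>
    -- r is one of the quotients and a lower bound for all of them
    have hmem : ∃ c ∈ W, r = PySem.Int.floordiv (L.count c : Int) (W.count c : Int) := by
      have := PySem.List.min?_mem hm
      obtain ⟨c, hc, hcr⟩ := List.mem_map.mp this
      exact ⟨c, (PySem.Set.mem_ofList W c).mp hc, hcr.symm⟩
    have hmin : ∀ c ∈ W, r ≤ PySem.Int.floordiv (L.count c : Int) (W.count c : Int) := by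
      intro c hc
      exact PySem.List.min?_isMin hm _
        (List.mem_map.mpr ⟨c, (PySem.Set.mem_ofList W c).mpr hc, rfl⟩)
    obtain ⟨c0, hc0W, hc0r⟩ := hmem
    have hw0 : (0 : Int) < (W.count c0 : Int) := by
      exact_mod_cast List.count_pos_iff.mpr hc0W
    have hr0 : 0 ≤ r := by
      rw [hc0r]
      exact (le_floordiv_iff _ _ _ hw0).mpr (by rw [zero_mul]; positivity)
    -- first round: the guard always passes (every count of a nonempty text is positive)
    have hkeys0 : (PySem.Dict.counter L).keys ≠ [] := by
      rw [PySem.Dict.keys_counter]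
      obtain ⟨c, hc⟩ := List.exists_mem_of_ne_nil L hL
      exact List.ne_nil_of_mem ((PySem.Set.mem_ofList L c).mpr hc)
    have hguard0 : pyCounterMinVal (PySem.Dict.counter L) > 0 := by
      rw [minVal_pos_iff _ hkeys0]
      intro c hc
      rw [PySem.Dict.getD_counter]
      rw [PySem.Dict.keys_counter] at hc
      exact_mod_cast List.count_pos_iff.mpr ((PySem.Set.mem_ofList L c).mp hc)
    have hval1 : ∀ c, (pySubtract (PySem.Dict.counter L) (PySem.Dict.counter W)).getD c 0
        = (L.count c : Int) - 1 * (W.count c : Int) := by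
      intro c
      rw [subtract_getD, PySem.Dict.getD_counter]
      ring
    have hkeys1 : ∀ c, c ∈ (pySubtract (PySem.Dict.counter L) (PySem.Dict.counter W)).keys
        ↔ c ∈ L ∨ c ∈ W := by
      intro c
      rw [subtract_mem_keys, PySem.Dict.keys_counter, PySem.Set.mem_ofList]
    have hkne1 : (pySubtract (PySem.Dict.counter L) (PySem.Dict.counter W)).keys ≠ [] :=
      List.ne_nil_of_mem ((hkeys1 c0).mpr (Or.inr hc0W))
    rw [show L.length + 2 = (L.length + 1) + 1 from rfl, loopA_succ, if_pos hguard0]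
    by_cases hr1 : 1 ≤ r
    · -- the first subtraction stays nonnegative: i becomes 1, then loop_run finishes the job
      have hpos1 : pyCounterMinVal (pySubtract (PySem.Dict.counter L) (PySem.Dict.counter W)) ≥ 0 := by
        rw [minVal_nonneg_iff _ hkne1]
        intro c hc
        rw [hval1 c]
        rcases (hkeys1 c).mp hc with hcL | hcW
        · by_cases hcW2 : c ∈ W
          · have hw : (0 : Int) < (W.count c : Int) := by
              exact_mod_cast List.count_pos_iff.mpr hcW2
            have h4 := (le_floordiv_iff (L.count c : Int) (W.count c : Int) 1 hw).mp
              (le_trans hr1 (hmin c hcW2))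
            omega
          · have h0 : ((W.count c : Int)) = 0 := by
              exact_mod_cast List.count_eq_zero.mpr hcW2
            rw [h0]
            simp
        · have hw : (0 : Int) < (W.count c : Int) := by
            exact_mod_cast List.count_pos_iff.mpr hcW
          have h4 := (le_floordiv_iff (L.count c : Int) (W.count c : Int) 1 hw).mp
            (le_trans hr1 (hmin c hcW))
          omega
      rw [if_pos hpos1]
      have hrlen : r ≤ (L.count c0 : Int) := by
        rw [hc0r]
        exact floordiv_le_self _ _ (by positivity) hw0.le
      have hcnt : L.count c0 ≤ L.length := List.count_le_length
      rw [loop_run L W r ⟨c0, hc0W, hc0r⟩ hmin (L.length + 1) _ (0 + 1) 1 le_rfl hr1 hval1 hkeys1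
        (by omega)]
      show (0:Int) + 1 + (r - 1) = r
      omega
    · -- r = 0: the first subtraction already goes negative, i stays 0, then the loop stops
      have hr0' : r = 0 := by omega
      have hneg1 : ¬ (pyCounterMinVal (pySubtract (PySem.Dict.counter L) (PySem.Dict.counter W)) ≥ 0) := by
        intro hge
        have hall := (minVal_nonneg_iff _ hkne1).mp hge
        have h1 := hall c0 ((hkeys1 c0).mpr (Or.inr hc0W))
        rw [hval1 c0] at h1
        have h4 : 1 ≤ PySem.Int.floordiv (L.count c0 : Int) (W.count c0 : Int) :=
          (le_floordiv_iff _ _ _ hw0).mpr (by omega)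
        omega
      rw [if_neg hneg1]
      rw [loop_stop L W r ⟨c0, hc0W, hc0r⟩ (L.length + 1) _ 0 1 hval1 hkeys1 (by omega)]
      show (0:Int) = r
      omega

theorem toList_ne_nil (s : String) (h : s ≠ "") : s.toList ≠ [] := by
  intro hh
  apply h
  have := congrArg String.ofList hh
  simpa using this

-- ===== VERDICT (by name: the statement is the Claim_ definition above) =====
theorem maxNumberOfWords_spec : Claim_equal_maxNumberOfWords := by
  intro text word _ hpre
  unfold Spec_maxNumberOfWords maxNumberOfWords maxNumberOfWords_alt
  have hL : (PySem.Str.lower text).toList ≠ [] := by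
    rw [PySem.Str.toList_lower]
    simpa [PySem.Chars.lower] using toList_ne_nil text hpre.1
  have hW : (PySem.Str.lower word).toList ≠ [] := by
    rw [PySem.Str.toList_lower]
    simpa [PySem.Chars.lower] using toList_ne_nil word hpre.2
  exact core_eq _ _ hL hW
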